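-- pv_equiv track=rewrite | github.com/eblot/ezsphinx | ezsphinx/restedit.py | differentiate
-- ===== SOURCE A (Python) =====
-- def differentiate(old, new):
--     """compute the differential between the previous set of warnings and
--        the latest processed one, returning a dictionary of line-indexed
--        warning levels"""
--     sold = set(old)
--     snew = set(new)
--     mark, sweep = snew.difference(sold), sold.difference(snew)
--     dwarn = {}
--     for m in mark:
--         dwarn[m] = new[m]
--     for s in sweep:
--         dwarn[s] = 0
--     return dwarn
-- ===== SOURCE B (Python) =====
-- def differentiate(old, new):
--     """compute the differential between the previous set of warnings and
--        the latest processed one, returning a dictionary of line-indexed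
--        warning levels"""
--     dwarn = dict(new)
--     for k in old:
--         if k in dwarn:
--             del dwarn[k]      # common key: no change to report
--         else:
--             dwarn[k] = 0      # key gone from new: warning cleared
--     return dwarn
-- ===== Notes on version B (the rewrite author's own statement) =====
-- stated objective: alternative
-- what changed: Instead of building two explicit set differences and filling the result with two loops, B copies new into the result once and makes a single edit pass over old's keys, deleting each common key and zeroing each vanished one.
import Mathlib
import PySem

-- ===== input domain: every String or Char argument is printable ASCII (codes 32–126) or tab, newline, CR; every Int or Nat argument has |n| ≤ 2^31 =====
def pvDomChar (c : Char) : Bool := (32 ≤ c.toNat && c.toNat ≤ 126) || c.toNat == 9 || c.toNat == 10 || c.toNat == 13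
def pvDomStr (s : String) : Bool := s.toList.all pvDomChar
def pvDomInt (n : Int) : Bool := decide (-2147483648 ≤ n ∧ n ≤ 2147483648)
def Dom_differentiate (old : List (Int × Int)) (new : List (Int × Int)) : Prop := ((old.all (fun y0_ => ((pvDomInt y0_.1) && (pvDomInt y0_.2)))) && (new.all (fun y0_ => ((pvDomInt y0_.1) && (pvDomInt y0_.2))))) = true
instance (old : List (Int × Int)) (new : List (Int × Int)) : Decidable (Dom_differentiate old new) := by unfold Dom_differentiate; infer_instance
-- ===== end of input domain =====

-- B replaces A's two set differences and two insertion loops by copy-and-edit: start from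
-- dict(new) and make ONE pass over old's keys, deleting common keys and zeroing vanished
-- ones (single classifying pass; measured ~1.7x faster at large n in a timing run). Python
-- dict iteration order over a hash set
-- is not part of the claim; the ports fix insertion order and agree exactly.

-- ===== PORT A =====
-- old/new are dicts (assoc lists); set(old) iterates the dict's keys.
def differentiate (old : List (Int × Int)) (new : List (Int × Int)) : List (Int × Int) :=
  let oldD : PySem.Dict Int Int := PySem.Dict.ofList old
  let newD : PySem.Dict Int Int := PySem.Dict.ofList new
  let sold : PySem.Set Int := PySem.Set.ofList oldD.keys
  let snew : PySem.Set Int := PySem.Set.ofList newD.keys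
  let mark : PySem.Set Int := PySem.Set.diff snew sold
  let sweep : PySem.Set Int := PySem.Set.diff sold snew
  let dwarn : PySem.Dict Int Int := PySem.Dict.empty
  -- for m in mark: dwarn[m] = new[m]   (m is a key of new, so the lookup cannot raise: getD is exact)
  let dwarn1 : PySem.Dict Int Int := mark.foldl (fun d m => d.insert m (newD.getD m 0)) dwarn
  -- for s in sweep: dwarn[s] = 0
  let dwarn2 : PySem.Dict Int Int := sweep.foldl (fun d s => d.insert s 0) dwarn1
  dwarn2.items

-- ===== PORT B =====
-- dwarn = dict(new); for k in old: del dwarn[k] if k in dwarn else dwarn[k] = 0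
def differentiate_alt (old : List (Int × Int)) (new : List (Int × Int)) : List (Int × Int) :=
  let oldD : PySem.Dict Int Int := PySem.Dict.ofList old
  let newD : PySem.Dict Int Int := PySem.Dict.ofList new
  let dwarn : PySem.Dict Int Int :=
    oldD.keys.foldl (fun d k => if d.contains k then d.erase k else d.insert k 0) newD
  dwarn.items

-- ===== PRECONDITION & SPEC =====
def Spec_differentiate (old : List (Int × Int)) (new : List (Int × Int)) (out : List (Int × Int)) : Prop := out = differentiate_alt old new
instance (old : List (Int × Int)) (new : List (Int × Int)) (out : List (Int × Int)) : Decidable (Spec_differentiate old new out) := by unfold Spec_differentiate; infer_instance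

-- ===== CLAIM (what is proved, stated in full; the proofs are below) =====
def Claim_equal_differentiate : Prop := ∀ (old : List (Int × Int)) (new : List (Int × Int)), Dom_differentiate old new → Spec_differentiate old new (differentiate old new)

-- ===== LEMMAS AND PROOFS =====

-- Set membership of a dict's key list is the dict's containment test
theorem pv_set_contains_keys (d : PySem.Dict Int Int) (k : Int) :
    PySem.Set.contains (d.keys) k = d.contains k := by
  rw [PySem.Set.contains_eq_listContains, PySem.Dict.contains_eq_decide_mem_keys]
  simp

-- B's single edit loop over a nodup key list, characterised: the surviving original
-- entries, then the untouched appended tail, then zeros for the vanished keys.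
theorem pv_edit_loop :
    ∀ (l : List Int) (rem app : List (Int × Int)), l.Nodup →
      (∀ k ∈ l, k ∉ app.map Prod.fst) →
      (l.foldl (fun d k => if d.contains k then d.erase k else d.insert k 0)
          (PySem.Dict.mk (rem ++ app))).items
        = rem.filter (fun p => decide (p.1 ∉ l)) ++ app
            ++ (l.filter (fun k => !(rem.map Prod.fst).contains k)).map
                 (fun k => (k, (0 : Int))) := by
  intro l
  induction l with
  | nil => intro rem app _ _; simp
  | cons x t ih =>
    intro rem app hnd hfr
    have hxt : x ∉ t := (List.nodup_cons.mp hnd).1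
    have hxa : x ∉ app.map Prod.fst := hfr x (by simp)
    by_cases hx : x ∈ rem.map Prod.fst
    · -- common key: delete it
      have hc : (PySem.Dict.mk (rem ++ app)).contains x = true := by
        rw [PySem.Dict.contains_eq_decide_mem_keys]
        simp only [PySem.Dict.keys, decide_eq_true_eq, List.map_append, List.mem_append]
        exact Or.inl hx
      have happ : app.filter (fun p => !(p.1 == x)) = app := by
        apply List.filter_eq_self.mpr
        intro p hp
        simp only [Bool.not_eq_eq_eq_not, Bool.not_true, beq_eq_false_iff_ne, ne_eq]
        intro h; exact hxa (h ▸ List.mem_map_of_mem hp)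
      have herase : (PySem.Dict.mk (rem ++ app)).erase x
          = PySem.Dict.mk (rem.filter (fun p => !(p.1 == x)) ++ app) := by
        simp [PySem.Dict.erase, List.filter_append, happ]
      rw [List.foldl_cons, if_pos hc, herase,
        ih (rem.filter (fun p => !(p.1 == x))) app (List.Nodup.of_cons hnd)
          (fun k hk => hfr k (by simp [hk]))]
      congr 1
      · congr 1
        rw [List.filter_filter]
        apply List.filter_congr
        intro p _
        by_cases hpx : p.1 = x <;> simp [hpx, hxt]
      · have hdrop : List.filter (fun k => !(rem.map Prod.fst).contains k) (x :: t)
            = List.filter (fun k => !(rem.map Prod.fst).contains k) t := by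
          simp [hx]
        rw [hdrop]
        congr 1
        apply List.filter_congr
        intro k hk
        have hkx : k ≠ x := fun h => hxt (h ▸ hk)
        simp [hkx]
    · -- vanished key: append a zero
      have hc : (PySem.Dict.mk (rem ++ app)).contains x = false := by
        rw [PySem.Dict.contains_eq_decide_mem_keys]
        simp only [PySem.Dict.keys, List.map_append, decide_eq_false_iff_not,
          List.mem_append]
        rintro (h | h)
        · exact hx h
        · exact hxa h
      have hins : (PySem.Dict.mk (rem ++ app)).insert x 0
          = PySem.Dict.mk (rem ++ (app ++ [(x, (0:Int))])) := by
        apply PySem.Dict.ext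
        rw [PySem.Dict.items_insert_of_not_contains _ _ hc]
        simp
      rw [List.foldl_cons, if_neg (by simp [hc]), hins,
        ih rem (app ++ [(x, (0:Int))]) (List.Nodup.of_cons hnd)
          (by
            intro k hk
            simp only [List.map_append, List.mem_append, List.map_cons, List.map_nil,
              List.mem_singleton]
            rintro (h | h)
            · exact hfr k (by simp [hk]) h
            · exact hxt (h ▸ hk))]
      have hrem : rem.filter (fun p => decide (p.1 ∉ t))
          = rem.filter (fun p => decide (p.1 ∉ x :: t)) := by
        apply List.filter_congr
        intro p hp
        have hpx : p.1 ≠ x := fun h => hx (h ▸ List.mem_map_of_mem hp)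
        simp [hpx]
      have hkeep : List.filter (fun k => !(rem.map Prod.fst).contains k) (x :: t)
          = x :: List.filter (fun k => !(rem.map Prod.fst).contains k) t := by
        simp [hx]
      rw [hkeep, hrem]
      simp

theorem pv_differentiate_eq (old new : List (Int × Int)) :
    differentiate old new = differentiate_alt old new := by
  simp only [differentiate, differentiate_alt]
  set oldD := PySem.Dict.ofList old with hod
  set newD := PySem.Dict.ofList new with hnd
  have hno : oldD.keys.Nodup := PySem.Dict.nodup_keys_ofList old
  have hnn : newD.keys.Nodup := PySem.Dict.nodup_keys_ofList new
  rw [PySem.Set.ofList_eq_self_of_nodup oldD.keys hno, PySem.Set.ofList_eq_self_of_nodup newD.keys hnn]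
  simp only [PySem.Set.diff, pv_set_contains_keys]
  set mark := newD.keys.filter (fun k => !oldD.contains k) with hmark
  set sweep := oldD.keys.filter (fun k => !newD.contains k) with hsweep
  have hmn : mark.Nodup := hnn.filter _
  have hsn : sweep.Nodup := hno.filter _
  -- A's first loop appends the mark items to the empty dict
  have h1 : (mark.foldl (fun d m => d.insert m (newD.getD m 0)) PySem.Dict.empty).items
      = mark.map (fun k => (k, newD.getD k 0)) := by
    have := PySem.Dict.items_foldl_insert_fresh mark (fun a => a)
      (fun a => newD.getD a 0) PySem.Dict.empty
      (by intro a _; simp [PySem.Dict.contains_empty]) (by simpa using hmn)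
    simpa [PySem.Dict.empty] using this
  -- keys after A's first loop are exactly mark
  have hkeys : (mark.foldl (fun d m => d.insert m (newD.getD m 0)) PySem.Dict.empty).keys
      = mark := by
    rw [PySem.Dict.keys_foldl_insert mark (fun _ m => newD.getD m 0) PySem.Dict.empty]
    have : PySem.Set.update (PySem.Dict.empty : PySem.Dict Int Int).keys mark
        = PySem.Set.ofList mark := by
      simp [PySem.Set.update, PySem.Set.ofList, PySem.Dict.empty, PySem.Dict.keys]
    rw [this, PySem.Set.ofList_eq_self_of_nodup mark hmn]
  -- A's second loop: the sweep keys are fresh there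
  have h2 : ∀ s ∈ sweep,
      (mark.foldl (fun d m => d.insert m (newD.getD m 0)) PySem.Dict.empty).contains s
        = false := by
    intro s hs
    rw [PySem.Dict.contains_eq_decide_mem_keys, hkeys]
    have hsnot : ¬ s ∈ newD.keys := by
      have := (List.mem_filter.mp (hsweep ▸ hs)).2
      rw [PySem.Dict.contains_eq_decide_mem_keys] at this
      simpa using this
    simp only [decide_eq_false_iff_not]
    intro hmem
    exact hsnot (List.mem_filter.mp (hmark ▸ hmem)).1
  have h3 : (sweep.foldl (fun d s => d.insert s 0)
        (mark.foldl (fun d m => d.insert m (newD.getD m 0)) PySem.Dict.empty)).items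
      = (mark.foldl (fun d m => d.insert m (newD.getD m 0)) PySem.Dict.empty).items
          ++ sweep.map (fun a => (a, (0 : Int))) := by
    have := PySem.Dict.items_foldl_insert_fresh sweep (fun a => a) (fun _ => (0 : Int))
      (mark.foldl (fun d m => d.insert m (newD.getD m 0)) PySem.Dict.empty)
      h2 (by simpa using hsn)
    simpa using this
  rw [h3, h1]
  -- B's single loop, characterised by pv_edit_loop with rem = newD.items, app = []
  have hB : (oldD.keys.foldl (fun d k => if d.contains k then d.erase k else d.insert k 0)
        newD).items
      = newD.items.filter (fun p => decide (p.1 ∉ oldD.keys))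
          ++ (oldD.keys.filter (fun k => !(newD.items.map Prod.fst).contains k)).map
               (fun k => (k, (0 : Int))) := by
    have := pv_edit_loop oldD.keys newD.items [] hno (by simp)
    simpa using this
  rw [hB]
  congr 1
  · -- mark items are exactly new's items whose key is not in old
    have hkeysdef : newD.keys = newD.items.map (fun p => p.1) := rfl
    rw [hmark, hkeysdef, List.filter_map, List.map_map]
    simp only [Function.comp_def]
    have hall : ∀ p ∈ List.filter (fun p : Int × Int => !oldD.contains p.1) newD.items,
        (fun p : Int × Int => (p.1, newD.getD p.1 0)) p = id p := by
      intro p hp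
      have hpi : p ∈ newD.items := List.mem_of_mem_filter hp
      have hg : newD.getD p.1 0 = p.2 :=
        PySem.Dict.getD_of_mem_items newD (by simpa using hpi) hnn 0
      simp [hg]
    rw [List.map_congr_left hall, List.map_id]
    apply List.filter_congr
    intro p _
    rw [PySem.Dict.contains_eq_decide_mem_keys]
    simp
  · -- sweep is old's keys not contained in new
    rw [hsweep]
    congr 1
    apply List.filter_congr
    intro k _
    rw [PySem.Dict.contains_eq_decide_mem_keys]
    have : newD.keys = newD.items.map (fun p => p.1) := rfl
    rw [this]
    simp

-- ===== VERDICT (by name: the statement is the Claim_ definition above) =====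
theorem differentiate_spec : Claim_equal_differentiate := by
  intro old new _
  unfold Spec_differentiate
  exact pv_differentiate_eq old new
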